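-- pv_equiv track=rewrite | github.com/maximalisimus/linux-sh | l_sh_work/fail2ban_and_blacklist/handle-example-2.py | search_handle
-- ===== SOURCE A (Python) =====
-- def ip_no_mask(in_ip) -> str:
-- 	''' Convert an ip address to an address without a network mask. '''
-- 	return str(in_ip).split('/', 1)[0]
--
-- def search_handle(text: str, in_ip):
-- 	count = 0
-- 	rez = -1
-- 	nomask = ip_no_mask(in_ip)
-- 	for elem in text.split('\n'):
-- 		if nomask in elem:
-- 			rez = count
-- 		count += 1
-- 	if rez != -1:
-- 		return text.split('\n')[rez].split(' ')[-1]
-- 	else: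
-- 		return None
-- ===== SOURCE B (Python) =====
-- def ip_no_mask(in_ip) -> str:
--     ''' Convert an ip address to an address without a network mask. '''
--     return str(in_ip).split('/', 1)[0]
--
-- def search_handle(text: str, in_ip):
--     nomask = ip_no_mask(in_ip)
--     if '\n' in nomask:
--         return None  # a needle spanning lines can never lie inside one line
--     pos = text.rfind(nomask)          # last occurrence anywhere in the text
--     if pos == -1:
--         return None
--     end = text.find('\n', pos)        # carve out the line enclosing that occurrence
--     if end == -1:
--         end = len(text)
--     start = text.rfind('\n', 0, pos) + 1
--     line = text[start:end]
--     return line[line.rfind(' ') + 1:]  # suffix after the last space = split(' ')[-1]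
-- ===== Notes on version B (the rewrite author's own statement) =====
-- stated objective: alternative
-- what changed: Instead of splitting the text into lines and scanning them with a per-line membership test plus last-match bookkeeping, B runs one character-level str.rfind over the whole text to locate the last occurrence of the needle, carves out the enclosing line with rfind/find on the newline character, and takes the suffix after the line's last space.
import Mathlib
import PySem

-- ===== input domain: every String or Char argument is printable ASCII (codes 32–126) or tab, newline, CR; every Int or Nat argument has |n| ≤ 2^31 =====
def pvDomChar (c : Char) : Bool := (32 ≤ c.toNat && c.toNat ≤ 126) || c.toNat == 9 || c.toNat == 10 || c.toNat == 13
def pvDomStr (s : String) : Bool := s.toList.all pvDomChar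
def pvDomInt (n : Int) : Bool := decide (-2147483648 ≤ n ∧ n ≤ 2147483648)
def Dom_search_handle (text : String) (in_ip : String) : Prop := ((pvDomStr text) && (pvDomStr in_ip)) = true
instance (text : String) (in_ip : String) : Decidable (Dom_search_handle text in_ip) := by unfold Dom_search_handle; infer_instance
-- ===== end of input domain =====

-- B abandons A's split-into-lines scan (per-line membership test, last-match counter,
-- second split and re-index) for a character-level algorithm: one str.rfind over the whole
-- text locates the last occurrence of the needle, rfind/find on '\n' carve out the
-- enclosing line, and the suffix after the line's last space is the answer (alternative).

-- ===== PORT A =====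
def ip_no_mask (in_ip : String) : String :=
  PySem.List.pyGetD ((PySem.Str.splitMax? in_ip "/" 1).getD []) 0 ""

def search_handle (text : String) (in_ip : String) : Option String :=
  let nomask := ip_no_mask in_ip
  let st := ((PySem.Str.split? text "\n").getD []).foldl
    (fun (p : Int × Int) elem =>
      (p.1 + 1, if PySem.Str.isIn nomask elem then p.1 else p.2))
    (0, -1)
  if st.2 ≠ -1 then
    some (PySem.List.pyGetD
      ((PySem.Str.split? (PySem.List.pyGetD ((PySem.Str.split? text "\n").getD []) st.2 "") " ").getD [])
      (-1) "")
  else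
    none

-- ===== PORT B =====
def search_handle_alt (text : String) (in_ip : String) : Option String :=
  let nomask := ip_no_mask in_ip
  if PySem.Str.isIn "\n" nomask then none
  else
    let pos := PySem.Str.rfind text nomask
    if pos = -1 then none
    else
      let e0 := PySem.Str.findFrom text "\n" pos
      let e : Int := if e0 = -1 then (PySem.Str.len text : Int) else e0
      let start := PySem.Str.rfindFrom text "\n" 0 (some pos) + 1
      let line := PySem.Str.slice text (some start) (some e)
      some (PySem.Str.slice line (some (PySem.Str.rfind line " " + 1)) none)

-- ===== PRECONDITION & SPEC =====
def Spec_search_handle (text : String) (in_ip : String) (out : Option String) : Prop := out = search_handle_alt text in_ip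
instance (text : String) (in_ip : String) (out : Option String) : Decidable (Spec_search_handle text in_ip out) := by unfold Spec_search_handle; infer_instance

-- ===== CLAIM (what is proved, stated in full; the proofs are below) =====
def Claim_equal_search_handle : Prop := ∀ (text : String) (in_ip : String), Dom_search_handle text in_ip → Spec_search_handle text in_ip (search_handle text in_ip)

-- ===== LEMMAS AND PROOFS =====

-- ---- proof-only helpers ----

/-- Reference splitter: `mySplit c l cur` is Python's `(cur[::-1]+l).split(c)`. -/
def mySplit (c : Char) : List Char → List Char → List (List Char)
  | [], cur => [cur.reverse]
  | x :: rest, cur => if x = c then cur.reverse :: mySplit c rest [] else mySplit c rest (x :: cur)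

/-- Char-level mirror of B's computation (proof vehicle). -/
def charB (cs sub : List Char) : Option (List Char) :=
  let pos := PySem.Chars.rfind cs sub
  if pos = -1 then none
  else
    let e0 := PySem.Chars.findFrom cs ['\n'] pos
    let e : Int := if e0 = -1 then (cs.length : Int) else e0
    let start := PySem.Chars.rfindFrom cs ['\n'] 0 (some pos) + 1
    let line := PySem.List.slice cs (some start) (some e)
    some (line.drop (PySem.Chars.rfind line [' '] + 1).toNat)

/-- What A computes, phrased as a reverse scan over the line list (proof vehicle). -/
def revSearch (cs sub : List Char) : Option (List Char) :=
  match (mySplit '\n' cs []).reverse.find? (fun e => PySem.Chars.isIn sub e) with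
  | some e => some (e.drop (PySem.Chars.rfind e [' '] + 1).toNat)
  | none => none

-- ---- rfind spec ----

theorem rfind_go_zero (s sub : List Char) :
    PySem.Chars.rfind.go s sub 0 = if sub.isPrefixOf s = true then 0 else -1 := by
  rw [PySem.Chars.rfind.go.eq_def]

theorem rfind_go_succ (s sub : List Char) (j : Nat) :
    PySem.Chars.rfind.go s sub (j+1) =
      if sub.isPrefixOf (s.drop (j+1)) = true then ((j+1 : Nat) : Int)
      else PySem.Chars.rfind.go s sub j := by
  rw [PySem.Chars.rfind.go.eq_def]

theorem rfind_go_none (s sub : List Char) (j : Nat)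
    (h : ∀ i, i ≤ j → ¬ sub <+: s.drop i) : PySem.Chars.rfind.go s sub j = -1 := by
  induction j with
  | zero =>
    rw [rfind_go_zero, if_neg]
    simp only [List.isPrefixOf_iff_prefix]
    simpa using h 0 (Nat.le_refl 0)
  | succ j ih =>
    rw [rfind_go_succ, if_neg]
    · exact ih (fun i hi => h i (Nat.le_succ_of_le hi))
    · simp only [List.isPrefixOf_iff_prefix]
      exact h (j+1) (Nat.le_refl _)

theorem rfind_go_some (s sub : List Char) (j m : Nat) (hm : m ≤ j)
    (hp : sub <+: s.drop m) (hmax : ∀ i, m < i → i ≤ j → ¬ sub <+: s.drop i) :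
    PySem.Chars.rfind.go s sub j = (m : Int) := by
  induction j with
  | zero =>
    interval_cases m
    rw [rfind_go_zero, if_pos]
    · rfl
    · simp only [List.isPrefixOf_iff_prefix]
      simpa using hp
  | succ j ih =>
    rw [rfind_go_succ]
    by_cases hmj : m = j + 1
    · subst hmj
      rw [if_pos]
      simp only [List.isPrefixOf_iff_prefix]
      exact hp
    · have hm' : m ≤ j := by omega
      rw [if_neg]
      · exact ih hm' (fun i h1 h2 => hmax i h1 (Nat.le_succ_of_le h2))
      · simp only [List.isPrefixOf_iff_prefix]
        exact hmax (j+1) (by omega) (Nat.le_refl _)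

theorem rfind_eq_of_max (s sub : List Char) (m : Nat) (hm : m ≤ s.length)
    (hp : sub <+: s.drop m) (hmax : ∀ i, m < i → i ≤ s.length → ¬ sub <+: s.drop i) :
    PySem.Chars.rfind s sub = (m : Int) := by
  show PySem.Chars.rfind.go s sub s.length = (m : Int)
  exact rfind_go_some s sub s.length m hm hp hmax

theorem rfind_spec (s sub : List Char) (h : sub <:+: s) :
    ∃ m : Nat, PySem.Chars.rfind s sub = (m : Int) ∧ m ≤ s.length ∧ sub <+: s.drop m ∧
      ∀ i, m < i → i ≤ s.length → ¬ sub <+: s.drop i := by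
  obtain ⟨j, hj, hpj⟩ : ∃ j, j ≤ s.length ∧ sub <+: s.drop j := by
    obtain ⟨u, v, rfl⟩ := h
    exact ⟨u.length, by simp, by simp⟩
  refine ⟨Nat.findGreatest (fun i => sub <+: s.drop i) s.length, ?_, Nat.findGreatest_le _, ?_, ?_⟩
  · exact rfind_eq_of_max s sub _ (Nat.findGreatest_le _)
      (Nat.findGreatest_spec (P := fun i => sub <+: s.drop i) hj hpj)
      (fun i h1 h2 => Nat.findGreatest_is_greatest (P := fun i => sub <+: s.drop i) h1 h2)
  · exact Nat.findGreatest_spec (P := fun i => sub <+: s.drop i) hj hpj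
  · exact fun i h1 h2 => Nat.findGreatest_is_greatest (P := fun i => sub <+: s.drop i) h1 h2

theorem rfind_eq_neg_one_iff (s sub : List Char) :
    PySem.Chars.rfind s sub = -1 ↔ ¬ sub <:+: s := by
  constructor
  · intro hr hinf
    obtain ⟨m, hm, _⟩ := rfind_spec s sub hinf
    rw [hr] at hm
    omega
  · intro hinf
    show PySem.Chars.rfind.go s sub s.length = -1
    refine rfind_go_none s sub s.length (fun i _ hp => hinf ?_)
    exact hp.isInfix.trans (List.drop_suffix i s).isInfix

-- ---- occurrence decomposition around a separator ----

theorem drop_append_sep (a b : List Char) (c : Char) (q : Nat) :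
    (a ++ c :: b).drop (a.length + 1 + q) = b.drop q := by
  rw [show a.length + 1 + q = a.length + (1 + q) from by omega, ← List.drop_drop, List.drop_left,
    Nat.add_comm 1 q, List.drop_succ_cons]

theorem prefix_append_sep_iff (sub x y : List Char) (c : Char) (hc : c ∉ sub) :
    sub <+: x ++ c :: y ↔ sub <+: x := by
  constructor
  · intro h
    by_cases hx : sub <+: x
    · exact hx
    · rcases List.prefix_or_prefix_of_prefix h (List.prefix_append x (c :: y)) with h1 | h1
      · exact absurd h1 hx
      · obtain ⟨t, rfl⟩ := h1
        have ht : t <+: c :: y := (List.prefix_append_right_inj x).mp h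
        cases t with
        | nil => exact absurd (by simp) hx
        | cons t0 ts =>
          obtain ⟨rfl, -⟩ := List.cons_prefix_cons.mp ht
          exact absurd (by simp) hc
  · intro h
    exact h.trans (List.prefix_append x (c :: y))

theorem occ_decomp (sub a b : List Char) (c : Char) (hc : c ∉ sub) (p : Nat)
    (hp : sub <+: (a ++ c :: b).drop p) :
    (p ≤ a.length ∧ sub <+: a.drop p) ∨ (∃ q, p = a.length + 1 + q ∧ sub <+: b.drop q) := by
  by_cases hpa : p ≤ a.length
  · left
    refine ⟨hpa, ?_⟩
    rw [List.drop_append_of_le_length hpa] at hp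
    exact (prefix_append_sep_iff sub _ b c hc).mp hp
  · right
    refine ⟨p - (a.length + 1), by omega, ?_⟩
    have heq : (a ++ c :: b).drop p = b.drop (p - (a.length + 1)) := by
      rw [show p = a.length + 1 + (p - (a.length + 1)) from by omega, drop_append_sep]
      congr 1
      omega
    rw [heq] at hp
    exact hp

theorem infix_append_sep_iff (sub a b : List Char) (c : Char) (hc : c ∉ sub) :
    sub <:+: a ++ c :: b ↔ sub <:+: a ∨ sub <:+: b := by
  constructor
  · intro h
    obtain ⟨u, v, huv⟩ := h
    have hp : sub <+: (a ++ c :: b).drop u.length := by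
      rw [← huv]; simp
    rcases occ_decomp sub a b c hc u.length hp with ⟨-, h1⟩ | ⟨q, -, h1⟩
    · exact Or.inl (h1.isInfix.trans (List.drop_suffix _ a).isInfix)
    · exact Or.inr (h1.isInfix.trans (List.drop_suffix _ b).isInfix)
  · rintro (h | h)
    · exact h.trans (List.prefix_append a (c :: b)).isInfix
    · exact h.trans ((List.suffix_cons c b).trans (List.suffix_append a (c :: b))).isInfix

theorem rfind_append_right (sub a b : List Char) (c : Char) (hc : c ∉ sub)
    (hb : sub <:+: b) :
    PySem.Chars.rfind (a ++ c :: b) sub = (a.length : Int) + 1 + PySem.Chars.rfind b sub := by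
  obtain ⟨m, hm, hmle, hmp, hmmax⟩ := rfind_spec b sub hb
  rw [hm]
  have := rfind_eq_of_max (a ++ c :: b) sub (a.length + 1 + m)
    (by simp; omega)
    (by
      rw [drop_append_sep]; exact hmp)
    (by
      intro i h1 h2 hocc
      rcases occ_decomp sub a b c hc i hocc with ⟨h3, -⟩ | ⟨q, hq, h3⟩
      · omega
      · exact hmmax q (by omega) (by simp at h2; omega) h3)
  rw [this]
  push_cast
  ring

theorem rfind_append_left (sub a b : List Char) (c : Char) (hc : c ∉ sub)
    (hb : ¬ sub <:+: b) (ha : sub <:+: a) :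
    PySem.Chars.rfind (a ++ c :: b) sub = PySem.Chars.rfind a sub := by
  obtain ⟨m, hm, hmle, hmp, hmmax⟩ := rfind_spec a sub ha
  rw [hm]
  refine rfind_eq_of_max (a ++ c :: b) sub m (by simp; omega) ?_ ?_
  · rw [List.drop_append_of_le_length hmle]
    exact (prefix_append_sep_iff sub _ b c hc).mpr hmp
  · intro i h1 h2 hocc
    rcases occ_decomp sub a b c hc i hocc with ⟨h3, h4⟩ | ⟨q, hq, h3⟩
    · exact hmmax i h1 h3 h4
    · exact hb (h3.isInfix.trans (List.drop_suffix _ b).isInfix)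

-- ---- find/rfind on the separator itself ----

theorem find_no_sep (s : List Char) (c : Char) (h : c ∉ s) :
    PySem.Chars.find s [c] = -1 := by
  rw [PySem.Chars.find_eq_neg_one_iff]
  intro hinf
  exact h ((List.singleton_infix_iff c s).mp hinf)

theorem find_append_sep (x y : List Char) (c : Char) (hx : c ∉ x) :
    PySem.Chars.find (x ++ c :: y) [c] = (x.length : Int) := by
  have hinf : [c] <:+: x ++ c :: y :=
    (List.singleton_infix_iff c _).mpr (by simp)
  have h0 : 0 ≤ PySem.Chars.find (x ++ c :: y) [c] :=
    (PySem.Chars.find_nonneg_iff _ _).mpr hinf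
  obtain ⟨hpf, hmin⟩ := PySem.Chars.find_spec h0
  set f := (PySem.Chars.find (x ++ c :: y) [c]).toNat with hf
  have hfle : f ≤ x.length := by
    by_contra hgt
    exact hmin x.length (by omega) (by rw [List.drop_left]; simp)
  have hfeq : f = x.length := by
    by_contra hne
    have hflt : f < x.length := by omega
    rw [List.drop_append_of_le_length (by omega)] at hpf
    obtain ⟨t, ht⟩ := hpf
    have hxf : x.drop f ≠ [] := by
      simp only [ne_eq, List.drop_eq_nil_iff]
      omega
    cases hxd : x.drop f with
    | nil => exact absurd hxd hxf
    | cons z zs =>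
      rw [hxd] at ht
      have hz : z = c := by
        have := congrArg (List.head? ·) ht
        simpa using this.symm
      have : c ∈ x := by
        rw [← hz]
        exact List.mem_of_mem_drop (by rw [hxd]; simp)
      exact hx this
  have : PySem.Chars.find (x ++ c :: y) [c] = (f : Int) := by omega
  rw [this, hfeq]

theorem rfind_no_sep (s : List Char) (c : Char) (h : c ∉ s) :
    PySem.Chars.rfind s [c] = -1 := by
  rw [rfind_eq_neg_one_iff]
  intro hinf
  exact h ((List.singleton_infix_iff c s).mp hinf)

theorem rfind_append_sep (x y : List Char) (c : Char) (hy : c ∉ y) :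
    PySem.Chars.rfind (x ++ c :: y) [c] = (x.length : Int) := by
  refine rfind_eq_of_max (x ++ c :: y) [c] x.length (by simp) ?_ ?_
  · rw [List.drop_left]
    simp
  · intro i h1 h2 hocc
    have hd : (x ++ c :: y).drop i = y.drop (i - (x.length + 1)) := by
      rw [show i = x.length + 1 + (i - (x.length + 1)) from by omega, drop_append_sep]
      congr 1
      omega
    rw [hd] at hocc
    have : c ∈ y := (List.singleton_infix_iff c y).mp
      (hocc.isInfix.trans (List.drop_suffix _ y).isInfix)
    exact hy this

theorem neg_one_le_rfind (s sub : List Char) : -1 ≤ PySem.Chars.rfind s sub := by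
  by_cases h : sub <:+: s
  · obtain ⟨m, hm, _⟩ := rfind_spec s sub h
    rw [hm]; omega
  · rw [(rfind_eq_neg_one_iff s sub).mpr h]

-- ---- bounded rfindFrom reduces to rfind on a prefix ----

theorem rfindFrom_zero_some (s sub : List Char) (pos : Int) (h0 : 0 ≤ pos)
    (hl : pos ≤ (s.length : Int)) :
    PySem.Chars.rfindFrom s sub 0 (some pos) = PySem.Chars.rfind (s.take pos.toNat) sub := by
  unfold PySem.Chars.rfindFrom
  simp [not_lt.mpr hl, not_lt.mpr h0]
  exact fun h => h.symm

-- ---- mySplit structure ----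

theorem take_append_sep (a b : List Char) (c : Char) (q : Nat) :
    (a ++ c :: b).take (a.length + 1 + q) = a ++ c :: b.take q := by
  rw [show a.length + 1 + q = a.length + (q + 1) from by omega, List.take_append]
  simp

theorem rfind_sep_append_right (x y : List Char) (c : Char) (hy : c ∈ y) :
    PySem.Chars.rfind (x ++ c :: y) [c] = (x.length : Int) + 1 + PySem.Chars.rfind y [c] := by
  obtain ⟨m, hm, hmle, hmp, hmmax⟩ := rfind_spec y [c] ((List.singleton_infix_iff c y).mpr hy)
  rw [hm]
  have := rfind_eq_of_max (x ++ c :: y) [c] (x.length + 1 + m)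
    (by simp; omega)
    (by rw [drop_append_sep]; exact hmp)
    (by
      intro i h1 h2 hocc
      have hd : (x ++ c :: y).drop i = y.drop (i - (x.length + 1)) := by
        rw [show i = x.length + 1 + (i - (x.length + 1)) from by omega, drop_append_sep]
        congr 1
        omega
      rw [hd] at hocc
      exact hmmax (i - (x.length + 1)) (by omega) (by simp at h2; omega) hocc)
  rw [this]
  push_cast
  ring

theorem splitOn_go_zero (c : Char) (l cur : List Char) (acc : List (List Char)) :
    PySem.Chars.splitOn.go [c] 0 l cur acc = ((cur.reverse ++ l) :: acc).reverse := by
  rw [PySem.Chars.splitOn.go.eq_def]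

theorem splitOn_go_succ_nil (c : Char) (fuel : Nat) (cur : List Char) (acc : List (List Char)) :
    PySem.Chars.splitOn.go [c] (fuel+1) [] cur acc = (cur.reverse :: acc).reverse := by
  rw [PySem.Chars.splitOn.go.eq_def]

theorem splitOn_go_succ_cons (c : Char) (fuel : Nat) (x : Char) (rest cur : List Char)
    (acc : List (List Char)) :
    PySem.Chars.splitOn.go [c] (fuel+1) (x :: rest) cur acc =
      if c = x then PySem.Chars.splitOn.go [c] fuel rest [] (cur.reverse :: acc)
      else PySem.Chars.splitOn.go [c] fuel rest (x :: cur) acc := by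
  rw [PySem.Chars.splitOn.go.eq_def]
  dsimp only [namedPattern]
  by_cases hcx : c = x
  · subst hcx
    rw [if_pos (by simp [List.isPrefixOf]), if_pos rfl]
    simp
  · rw [if_neg (by simp [List.isPrefixOf]; exact fun h => absurd h hcx), if_neg hcx]

theorem splitOn_go_eq_mySplit (c : Char) (fuel : Nat) (l cur : List Char)
    (acc : List (List Char)) (hf : l.length ≤ fuel) :
    PySem.Chars.splitOn.go [c] fuel l cur acc = acc.reverse ++ mySplit c l cur := by
  induction fuel generalizing l cur acc with
  | zero =>
    have : l = [] := by
      cases l with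
      | nil => rfl
      | cons x xs => simp at hf
    subst this
    rw [splitOn_go_zero]
    simp [mySplit]
  | succ fuel ih =>
    cases l with
    | nil =>
      rw [splitOn_go_succ_nil]
      simp [mySplit]
    | cons x rest =>
      rw [splitOn_go_succ_cons]
      simp only [List.length_cons] at hf
      by_cases hcx : c = x
      · rw [if_pos hcx, ih rest [] _ (by omega)]
        simp [mySplit, ← hcx]
      · rw [if_neg hcx, ih rest (x :: cur) acc (by omega)]
        simp only [mySplit]
        rw [if_neg (fun h => hcx h.symm)]

theorem splitOn_eq_mySplit (s : List Char) (c : Char) :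
    PySem.Chars.splitOn s [c] = mySplit c s [] := by
  show PySem.Chars.splitOn.go [c] (s.length + 1) s [] [] = mySplit c s []
  rw [splitOn_go_eq_mySplit c (s.length + 1) s [] [] (by omega)]
  rw [List.reverse_nil, List.nil_append]

theorem mySplit_no_sep (l cur : List Char) (c : Char) (h : c ∉ l) :
    mySplit c l cur = [cur.reverse ++ l] := by
  induction l generalizing cur with
  | nil => simp [mySplit]
  | cons x rest ih =>
    simp only [List.mem_cons, not_or] at h
    simp only [mySplit]
    rw [if_neg (fun hc => h.1 hc.symm), ih _ h.2]
    simp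

theorem mySplit_append_sep (x y cur : List Char) (c : Char) (hx : c ∉ x) :
    mySplit c (x ++ c :: y) cur = (cur.reverse ++ x) :: mySplit c y [] := by
  induction x generalizing cur with
  | nil =>
    simp [mySplit]
  | cons z zs ih =>
    simp only [List.mem_cons, not_or] at hx
    simp only [List.cons_append, mySplit]
    rw [if_neg (fun hc => hx.1 hc.symm), ih _ hx.2]
    simp

theorem mySplit_ne_nil (l cur : List Char) (c : Char) : mySplit c l cur ≠ [] := by
  induction l generalizing cur with
  | nil => simp [mySplit]
  | cons x rest ih =>
    simp only [mySplit]
    split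
    · simp
    · exact ih _

theorem mem_mySplit_infix (l cur e : List Char) (c : Char) (h : e ∈ mySplit c l cur) :
    e <:+: cur.reverse ++ l := by
  induction l generalizing cur with
  | nil =>
    simp only [mySplit, List.mem_singleton] at h
    subst h
    simp
  | cons x rest ih =>
    simp only [mySplit] at h
    split at h
    · rename_i hxc
      subst hxc
      rcases List.mem_cons.mp h with rfl | h2
      · exact (List.prefix_append _ _).isInfix
      · have := ih [] h2
        simp only [List.reverse_nil, List.nil_append] at this
        exact this.trans ((List.suffix_cons x rest).trans (List.suffix_append _ _)).isInfix
    · have := ih (x :: cur) h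
      rw [List.reverse_cons, List.append_assoc, List.singleton_append] at this
      exact this

theorem mem_mySplit_no_sep (l cur e : List Char) (c : Char) (hcur : c ∉ cur)
    (h : e ∈ mySplit c l cur) : c ∉ e := by
  induction l generalizing cur with
  | nil =>
    simp only [mySplit, List.mem_singleton] at h
    subst h
    simpa using hcur
  | cons x rest ih =>
    simp only [mySplit] at h
    split at h
    · rcases List.mem_cons.mp h with rfl | h2
      · simpa using hcur
      · exact ih [] (by simp) h2
    · rename_i hxc
      refine ih (x :: cur) ?_ h
      simp only [List.mem_cons, not_or]
      exact ⟨fun hc => hxc hc.symm, hcur⟩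

-- ---- first-separator decomposition ----

theorem exists_first_sep (l : List Char) (c : Char) (h : c ∈ l) :
    ∃ a b, l = a ++ c :: b ∧ c ∉ a := by
  induction l with
  | nil => simp at h
  | cons x rest ih =>
    by_cases hx : x = c
    · exact ⟨[], rest, by simp [hx], by simp⟩
    · have hc : c ∈ rest := by
        rcases List.mem_cons.mp h with h1 | h1
        · exact absurd h1.symm hx
        · exact h1
      obtain ⟨a, b, rfl, ha⟩ := ih hc
      exact ⟨x :: a, b, rfl, by simp only [List.mem_cons, not_or]; exact ⟨fun hh => hx hh.symm, ha⟩⟩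

/-- Last piece of the split = suffix after the last separator. -/
theorem mySplit_getLast? (e : List Char) (c : Char) :
    (mySplit c e []).getLast? = some (e.drop (PySem.Chars.rfind e [c] + 1).toNat) := by
  generalize hn : e.length = n
  induction n using Nat.strong_induction_on generalizing e with
  | _ n ih =>
    by_cases hce : c ∈ e
    · obtain ⟨x, y, rfl, hx⟩ := exists_first_sep e c hce
      rw [mySplit_append_sep x y [] c hx]
      simp only [List.reverse_nil, List.nil_append]
      rw [show (x :: mySplit c y []).getLast? = (mySplit c y []).getLast? by
        cases ht : mySplit c y [] with
        | nil => exact absurd ht (mySplit_ne_nil y [] c)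
        | cons z zs => exact List.getLast?_cons_cons]
      rw [ih y.length (by simp at hn; omega) y rfl]
      by_cases hcy : c ∈ y
      · rw [rfind_sep_append_right x y c hcy]
        obtain ⟨m, hm, hmle, -, -⟩ := rfind_spec y [c] ((List.singleton_infix_iff c y).mpr hcy)
        rw [hm]
        congr 1
        rw [show ((x.length : Int) + 1 + (m : Int) + 1).toNat = x.length + 1 + ((m : Int) + 1).toNat
          from by omega, drop_append_sep]
      · rw [rfind_append_sep x y c hcy, rfind_no_sep y c hcy]
        congr 1
        rw [show ((x.length : Int) + 1).toNat = x.length + 1 + ((-1 : Int) + 1).toNat from by omega,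
          drop_append_sep]
    · rw [mySplit_no_sep e [] c hce, rfind_no_sep e c hce]
      simp

-- ---- the main char-level equivalence ----

/-- The "carve out a line and take its last-space suffix" step, as one function. -/
def pieceOf (cs : List Char) (startv endv : Int) : List Char :=
  (PySem.List.slice cs (some startv) (some endv)).drop
    (PySem.Chars.rfind (PySem.List.slice cs (some startv) (some endv)) [' '] + 1).toNat

theorem slice_shift (a b : List Char) (c : Char) (s e : Int) (hs : 0 ≤ s) (he : 0 ≤ e) :
    PySem.List.slice (a ++ c :: b) (some ((a.length : Int) + 1 + s)) (some ((a.length : Int) + 1 + e))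
      = PySem.List.slice b (some s) (some e) := by
  rw [PySem.List.slice_toNat _ (by omega) (by omega), PySem.List.slice_toNat _ hs he,
    show ((a.length : Int) + 1 + s).toNat = a.length + 1 + s.toNat from by omega, drop_append_sep]
  congr 1
  omega

theorem pieceOf_shift (a b : List Char) (s e : Int) (hs : 0 ≤ s) (he : 0 ≤ e) :
    pieceOf (a ++ '\n' :: b) ((a.length : Int) + 1 + s) ((a.length : Int) + 1 + e) = pieceOf b s e := by
  unfold pieceOf
  rw [slice_shift a b '\n' s e hs he]

theorem pieceOf_all (cs : List Char) : pieceOf cs 0 (cs.length : Int) = cs.drop (PySem.Chars.rfind cs [' '] + 1).toNat := by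
  unfold pieceOf
  rw [PySem.List.slice_toNat _ (by omega) (by omega)]
  simp

/-- Evaluate `charB` once the rfind position is known. -/
theorem charB_eval (cs sub : List Char) (m : Nat)
    (hm : PySem.Chars.rfind cs sub = (m : Int)) (hmle : m ≤ cs.length) :
    charB cs sub = some (pieceOf cs
      (PySem.Chars.rfind (cs.take m) ['\n'] + 1)
      (if PySem.Chars.find (cs.drop m) ['\n'] = -1 then (cs.length : Int)
       else (m : Int) + PySem.Chars.find (cs.drop m) ['\n'])) := by
  simp only [charB, pieceOf]
  rw [hm, if_neg (by omega), PySem.Chars.findFrom_natCast cs ['\n'] m hmle,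
    rfindFrom_zero_some cs ['\n'] (m : Int) (by omega) (by exact_mod_cast Nat.cast_le.mpr hmle)]
  by_cases hF : PySem.Chars.find (cs.drop m) ['\n'] = -1
  · rw [if_pos hF, if_pos rfl, if_pos hF]
    simp
  · have hF0 : 0 ≤ PySem.Chars.find (cs.drop m) ['\n'] := by
      have := PySem.Chars.neg_one_le_find (cs.drop m) ['\n']
      omega
    rw [if_neg hF, if_neg (by omega), if_neg hF]
    simp

theorem charB_none (cs sub : List Char) (hin : ¬ sub <:+: cs) : charB cs sub = none := by
  simp only [charB]
  rw [(rfind_eq_neg_one_iff cs sub).mpr hin, if_pos rfl]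

theorem charB_shift (a b sub : List Char) (h : '\n' ∉ sub) (_ha : '\n' ∉ a) (hb : sub <:+: b) :
    charB (a ++ '\n' :: b) sub = charB b sub := by
  obtain ⟨m, hm, hmle, -, -⟩ := rfind_spec b sub hb
  have hlen : (a ++ '\n' :: b).length = a.length + 1 + b.length := by simp; omega
  have hpos : PySem.Chars.rfind (a ++ '\n' :: b) sub = ((a.length + 1 + m : Nat) : Int) := by
    rw [rfind_append_right sub a b '\n' h hb, hm]
    push_cast
    ring
  rw [charB_eval (a ++ '\n' :: b) sub (a.length + 1 + m) hpos (by omega),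
    charB_eval b sub m hm hmle]
  rw [drop_append_sep, take_append_sep, hlen]
  have hstart : PySem.Chars.rfind (a ++ '\n' :: b.take m) ['\n'] + 1
      = (a.length : Int) + 1 + (PySem.Chars.rfind (b.take m) ['\n'] + 1) := by
    by_cases hY : '\n' ∈ b.take m
    · rw [rfind_sep_append_right a (b.take m) '\n' hY]
      ring
    · rw [rfind_append_sep a (b.take m) '\n' hY, rfind_no_sep (b.take m) '\n' hY]
      ring
  rw [hstart]
  by_cases hF : PySem.Chars.find (b.drop m) ['\n'] = -1
  · rw [if_pos hF, if_pos hF]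
    rw [show ((a.length + 1 + b.length : Nat) : Int) = (a.length : Int) + 1 + (b.length : Int) from by push_cast; ring]
    rw [pieceOf_shift a b _ _ (by have := neg_one_le_rfind (b.take m) ['\n']; omega) (by omega)]
  · have hF0 : 0 ≤ PySem.Chars.find (b.drop m) ['\n'] := by
      have := PySem.Chars.neg_one_le_find (b.drop m) ['\n']
      omega
    rw [if_neg hF, if_neg hF]
    rw [show ((a.length + 1 + m : Nat) : Int) + PySem.Chars.find (b.drop m) ['\n']
        = (a.length : Int) + 1 + ((m : Int) + PySem.Chars.find (b.drop m) ['\n']) from by push_cast; ring]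
    rw [pieceOf_shift a b _ _ (by have := neg_one_le_rfind (b.take m) ['\n']; omega) (by omega)]

theorem charB_eq_revSearch (cs sub : List Char) (h : '\n' ∉ sub) :
    charB cs sub = revSearch cs sub := by
  suffices H : ∀ n (cs sub : List Char), '\n' ∉ sub → cs.length = n → charB cs sub = revSearch cs sub from
    H cs.length cs sub h rfl
  intro n
  induction n using Nat.strong_induction_on with
  | _ n ih =>
  intro cs sub h hn
  by_cases hcs : '\n' ∈ cs
  · obtain ⟨a, b, rfl, hna⟩ := exists_first_sep cs '\n' hcs
    have hrw : mySplit '\n' (a ++ '\n' :: b) [] = a :: mySplit '\n' b [] := by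
      have := mySplit_append_sep a b [] '\n' hna
      simpa using this
    by_cases hb : sub <:+: b
    · have hIH : charB b sub = revSearch b sub := by
        refine ih b.length ?_ b sub h rfl
        simp at hn
        omega
      rw [charB_shift a b sub h hna hb, hIH]
      unfold revSearch
      rw [hrw, List.reverse_cons, List.find?_append]
      cases hfind : (mySplit '\n' b []).reverse.find? (fun e => PySem.Chars.isIn sub e) with
      | some e => rw [Option.some_or]
      | none =>
        exfalso
        obtain ⟨m, hm, hmle, -, -⟩ := rfind_spec b sub hb
        have : revSearch b sub = none := by
          unfold revSearch
          rw [hfind]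
        rw [← hIH, charB_eval b sub m hm hmle] at this
        exact Option.some_ne_none _ this
    · by_cases haa : sub <:+: a
      · obtain ⟨m, hm, hmle, -, -⟩ := rfind_spec a sub haa
        have hpos : PySem.Chars.rfind (a ++ '\n' :: b) sub = (m : Int) :=
          (rfind_append_left sub a b '\n' h hb haa).trans hm
        rw [charB_eval (a ++ '\n' :: b) sub m hpos (by simp; omega)]
        rw [List.drop_append_of_le_length hmle, List.take_append_of_le_length hmle]
        have hnd : '\n' ∉ a.drop m := fun hx => hna (List.mem_of_mem_drop hx)
        have hnt : '\n' ∉ a.take m := fun hx => hna (List.mem_of_mem_take hx)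
        rw [find_append_sep (a.drop m) b '\n' hnd, rfind_no_sep (a.take m) '\n' hnt]
        rw [if_neg (by omega)]
        have hE : (m : Int) + ((a.drop m).length : Int) = (a.length : Int) := by
          simp
          omega
        rw [hE]
        unfold revSearch
        rw [hrw, List.reverse_cons, List.find?_append]
        have hnone : (mySplit '\n' b []).reverse.find? (fun e => PySem.Chars.isIn sub e) = none := by
          rw [List.find?_eq_none]
          intro e he
          simp only [Bool.not_eq_true, PySem.Chars.isIn_eq_false_iff]
          intro hinf
          have : e <:+: b := by
            have := mem_mySplit_infix b [] e '\n' (List.mem_reverse.mp he)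
            simpa using this
          exact hb (hinf.trans this)
        rw [hnone, Option.none_or, List.find?_cons_of_pos (by
          rw [PySem.Chars.isIn_iff_infix]
          exact haa)]
        have hpiece : pieceOf (a ++ '\n' :: b) ((-1 : Int) + 1) (a.length : Int)
            = a.drop (PySem.Chars.rfind a [' '] + 1).toNat := by
          unfold pieceOf
          rw [show ((-1 : Int) + 1) = (0 : Int) from by ring,
            PySem.List.slice_toNat _ (by omega) (by omega)]
          simp
        rw [hpiece]
      · have hnin : ¬ sub <:+: a ++ '\n' :: b := by
          rw [infix_append_sep_iff sub a b '\n' h]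
          rintro (h1 | h1)
          · exact haa h1
          · exact hb h1
        rw [charB_none _ _ hnin]
        unfold revSearch
        rw [hrw, List.reverse_cons, List.find?_append]
        have hnone : (mySplit '\n' b []).reverse.find? (fun e => PySem.Chars.isIn sub e) = none := by
          rw [List.find?_eq_none]
          intro e he
          simp only [Bool.not_eq_true, PySem.Chars.isIn_eq_false_iff]
          intro hinf
          have : e <:+: b := by
            have := mem_mySplit_infix b [] e '\n' (List.mem_reverse.mp he)
            simpa using this
          exact hb (hinf.trans this)
        rw [hnone, Option.none_or, List.find?_cons_of_neg (by
          simp only [Bool.not_eq_true, PySem.Chars.isIn_eq_false_iff]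
          exact haa)]
        simp
  · unfold revSearch
    rw [mySplit_no_sep cs [] '\n' hcs]
    simp only [List.reverse_nil, List.nil_append, List.reverse_singleton]
    by_cases hin : sub <:+: cs
    · obtain ⟨m, hm, hmle, -, -⟩ := rfind_spec cs sub hin
      rw [charB_eval cs sub m hm hmle]
      have hnd : '\n' ∉ cs.drop m := fun hx => hcs (List.mem_of_mem_drop hx)
      have hnt : '\n' ∉ cs.take m := fun hx => hcs (List.mem_of_mem_take hx)
      rw [find_no_sep (cs.drop m) '\n' hnd, rfind_no_sep (cs.take m) '\n' hnt, if_pos rfl]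
      rw [List.find?_cons_of_pos (by rw [PySem.Chars.isIn_iff_infix]; exact hin)]
      rw [show ((-1 : Int) + 1) = (0 : Int) from by ring, pieceOf_all]
    · rw [charB_none cs sub hin, List.find?_cons_of_neg (by
        simp only [Bool.not_eq_true, PySem.Chars.isIn_eq_false_iff]
        exact hin)]
      simp

-- ---- A equals the reverse-scan formulation (fold bookkeeping elimination) ----

theorem fold_fst (pred : String → Bool) (l : List String) (c0 r0 : Int) :
    (l.foldl (fun (p : Int × Int) e => (p.1 + 1, if pred e then p.1 else p.2)) (c0, r0)).1
      = c0 + l.length := by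
  induction l generalizing c0 r0 with
  | nil => simp
  | cons x xs ih => simp [List.foldl_cons, ih]; omega

theorem fold_snd (pred : String → Bool) (l : List String) (c0 r0 : Int) :
    (match l.reverse.find? pred with
     | none => (l.foldl (fun (p : Int × Int) e => (p.1 + 1, if pred e then p.1 else p.2)) (c0, r0)).2 = r0
     | some e => ∃ k : Nat,
         (l.foldl (fun (p : Int × Int) e => (p.1 + 1, if pred e then p.1 else p.2)) (c0, r0)).2 = c0 + k
         ∧ k < l.length ∧ l[k]? = some e) := by
  induction l using List.reverseRecOn generalizing c0 r0 with
  | nil => simp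
  | append_singleton xs x ih =>
    rw [List.foldl_append, List.reverse_append]
    simp only [List.reverse_singleton, List.singleton_append, List.find?_cons, List.foldl_cons,
      List.foldl_nil]
    by_cases hx : pred x
    · simp only [hx, if_pos]
      refine ⟨xs.length, ?_, by simp, by simp⟩
      simp [fold_fst]
    · simp only [hx, ite_false, Bool.false_eq_true]
      have := ih c0 r0
      cases hfind : xs.reverse.find? pred with
      | none => simpa [hfind] using this
      | some e =>
        rw [hfind] at this
        obtain ⟨k, hk, hlt, hget⟩ := this
        exact ⟨k, hk, by simp; omega, by rw [List.getElem?_append_left hlt]; exact hget⟩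

-- ---- bridges between the String ports and the char-level vehicles ----

theorem split_getD (s sep : String) (c : Char) (hsep : sep.toList = [c]) :
    (PySem.Str.split? s sep).getD [] = (mySplit c s.toList []).map String.ofList := by
  rw [PySem.Str.split?.eq_1, PySem.Chars.split?.eq_1, hsep]
  simp [splitOn_eq_mySplit]

theorem pyGetD_neg_one {α : Type} (l : List α) (d : α) :
    PySem.List.pyGetD l (-1) d = l.getLast?.getD d := by
  cases l with
  | nil => simp [PySem.List.pyGetD, PySem.List.pyGet?, PySem.List.pyIdx?]
  | cons x xs =>
    simp [PySem.List.pyGetD, PySem.List.pyGet?, PySem.List.pyIdx?, List.getLast?_eq_getElem?]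

theorem token_eq (e : List Char) :
    PySem.List.pyGetD ((PySem.Str.split? (String.ofList e) " ").getD []) (-1) ""
      = String.ofList (e.drop (PySem.Chars.rfind e [' '] + 1).toNat) := by
  rw [split_getD (String.ofList e) " " ' ' (by decide), String.toList_ofList,
    pyGetD_neg_one, List.getLast?_map, mySplit_getLast?]
  rfl

theorem lines_eq (text : String) :
    (PySem.Str.split? text "\n").getD [] = (mySplit '\n' text.toList []).map String.ofList := by
  exact split_getD text "\n" '\n' (by decide)

theorem A_eq_revSearch (text in_ip : String) :
    search_handle text in_ip = Option.map String.ofList (revSearch text.toList (ip_no_mask in_ip).toList) := by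
  unfold search_handle
  dsimp only
  set nomask := ip_no_mask in_ip with hnm
  set lines := (PySem.Str.split? text "\n").getD [] with hl
  have hlm : lines = (mySplit '\n' text.toList []).map String.ofList := lines_eq text
  have hpred : (fun elem => PySem.Str.isIn nomask elem) ∘ String.ofList
      = fun e => PySem.Chars.isIn nomask.toList e := by
    funext e
    simp [PySem.Str.isIn_eq]
  have hfind_eq : lines.reverse.find? (fun elem => PySem.Str.isIn nomask elem)
      = ((mySplit '\n' text.toList []).reverse.find?
          (fun e => PySem.Chars.isIn nomask.toList e)).map String.ofList := by
    rw [hlm, ← List.map_reverse, List.find?_map, hpred]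
  have h := fold_snd (fun elem => PySem.Str.isIn nomask elem) lines 0 (-1)
  unfold revSearch
  cases hfind : (mySplit '\n' text.toList []).reverse.find?
      (fun e => PySem.Chars.isIn nomask.toList e) with
  | none =>
    rw [hfind] at hfind_eq
    rw [hfind_eq] at h
    simp only [Option.map_none] at h
    rw [if_neg (not_ne_iff.mpr h)]
    rfl
  | some e' =>
    rw [hfind] at hfind_eq
    rw [hfind_eq] at h
    simp only [Option.map_some] at h
    obtain ⟨k, hk, hlt, hget⟩ := h
    rw [hk, if_pos (by omega)]
    have hpg : PySem.List.pyGetD lines ((0 : Int) + k) "" = String.ofList e' := by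
      rw [show ((0 : Int) + k) = ((k : Nat) : Int) from by omega, PySem.List.pyGetD_natCast,
        List.getD, hget]
      rfl
    rw [hpg, token_eq]
    rfl

theorem strTail_eq (line : String) :
    PySem.Str.slice line (some (PySem.Str.rfind line " " + 1)) none
      = String.ofList (line.toList.drop (PySem.Chars.rfind line.toList [' '] + 1).toNat) := by
  have h0 : 0 ≤ PySem.Chars.rfind line.toList [' '] + 1 := by
    have := neg_one_le_rfind line.toList [' ']
    omega
  apply String.toList_inj.mp
  rw [PySem.Str.toList_slice, PySem.Chars.slice_eq_listSlice, PySem.Str.rfind_eq,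
    show (" " : String).toList = [' '] from by decide,
    PySem.List.slice_from line.toList h0, String.toList_ofList]

theorem B_eq_charB (text in_ip : String) (h : '\n' ∉ (ip_no_mask in_ip).toList) :
    search_handle_alt text in_ip = Option.map String.ofList (charB text.toList (ip_no_mask in_ip).toList) := by
  unfold search_handle_alt charB
  dsimp only
  have hguard : PySem.Str.isIn "\n" (ip_no_mask in_ip) = false := by
    rw [PySem.Str.isIn_eq, PySem.Chars.isIn_eq_false_iff]
    intro hinf
    exact h (hinf.sublist.subset (by decide))
  rw [hguard]
  simp only [Bool.false_eq_true, if_false]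
  rw [PySem.Str.rfind_eq]
  by_cases hpos : PySem.Chars.rfind text.toList (ip_no_mask in_ip).toList = -1
  · rw [hpos]
    simp
  · rw [if_neg hpos, if_neg hpos]
    simp only [Option.map_some]
    rw [PySem.Str.findFrom_eq, PySem.Str.rfindFrom_eq, PySem.Str.len_eq,
      show ("\n" : String).toList = ['\n'] from by decide]
    rw [strTail_eq, PySem.Str.toList_slice, PySem.Chars.slice_eq_listSlice]

theorem revSearch_none_of_nl (cs sub : List Char) (h : '\n' ∈ sub) :
    revSearch cs sub = none := by
  unfold revSearch
  rw [List.find?_eq_none.mpr]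
  intro e he
  simp only [Bool.not_eq_true, PySem.Chars.isIn_eq_false_iff]
  intro hinf
  have hne : '\n' ∉ e := mem_mySplit_no_sep cs [] e '\n' (by simp) (List.mem_reverse.mp he)
  exact hne (hinf.sublist.subset h)

-- ===== VERDICT (by name: the statement is the Claim_ definition above) =====
theorem search_handle_spec : Claim_equal_search_handle := by
  intro text in_ip _
  unfold Spec_search_handle
  by_cases h : '\n' ∈ (ip_no_mask in_ip).toList
  · rw [A_eq_revSearch, revSearch_none_of_nl _ _ h]
    have hIn : PySem.Chars.isIn ['\n'] (ip_no_mask in_ip).toList = true := by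
      rw [PySem.Chars.isIn_iff_infix]
      exact (List.singleton_infix_iff '\n' _).mpr h
    simp [search_handle_alt, hIn]
  · rw [A_eq_revSearch, B_eq_charB _ _ h, charB_eq_revSearch _ _ h]
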